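-- pv_equiv track=rewrite | github.com/VimalMinsariya/euler-project | ep51to100/51.py | asterisk
-- ===== SOURCE A (Python) =====
-- def combination(list,r):
--     result = []
--     if len(list) == r and r > 0:
--         return [list]
--     elif r == 0:
--         return [[]]
--     else:
--         first = list[0]
--         remLst = list[1:]
--         for p in combination(remLst,r-1):
--                 result.append([first]+p)
--         for p in combination(remLst,r):
--                 result.append(p)
--         return result
--
-- def asterisk(n,m):
--     ast = []
--     a = dict()
--     q = str(n)
--     digit = 0
--     for num in q:
--         if num in a:
--             a[num].append(digit)
--         else:
--             a[num] = [digit]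
--         digit += 1
--     for digit in a:
--         if len(a[digit]) >= m:
--             b = combination(a[digit],m)
--             for com in b:
--                 k = ''
--                 for digit in range(len(q)):
--                     if digit in com:
--                         k += '*'
--                     else:
--                         k += q[digit]
--                 ast.append(k)
--     return ast
-- ===== SOURCE B (Python) =====
-- def _combos(lst, r):
--     # lexicographic combinations by choosing the first element's index
--     if r == 0:
--         return [[]]
--     return [[lst[i]] + rest
--             for i in range(len(lst) - r + 1)
--             for rest in _combos(lst[i + 1:], r - 1)]
--
-- def asterisk(n, m):
--     q = str(n)
--     groups = {}
--     for i, ch in enumerate(q):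
--         groups.setdefault(ch, []).append(i)
--     ast = []
--     for pos in groups.values():
--         if len(pos) >= m:
--             for com in _combos(pos, m):
--                 chars = list(q)
--                 for i in com:
--                     chars[i] = '*'
--                 ast.append(''.join(chars))
--     return ast
-- ===== Notes on version B (the rewrite author's own statement) =====
-- stated objective: alternative
-- what changed: Combinations are generated by iterating over the index of the first chosen element with a flat comprehension instead of A's binary include/exclude recursion, and masking assigns '*' directly into a char list at the chosen positions instead of scanning every position for membership in the combination.
import Mathlib
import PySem

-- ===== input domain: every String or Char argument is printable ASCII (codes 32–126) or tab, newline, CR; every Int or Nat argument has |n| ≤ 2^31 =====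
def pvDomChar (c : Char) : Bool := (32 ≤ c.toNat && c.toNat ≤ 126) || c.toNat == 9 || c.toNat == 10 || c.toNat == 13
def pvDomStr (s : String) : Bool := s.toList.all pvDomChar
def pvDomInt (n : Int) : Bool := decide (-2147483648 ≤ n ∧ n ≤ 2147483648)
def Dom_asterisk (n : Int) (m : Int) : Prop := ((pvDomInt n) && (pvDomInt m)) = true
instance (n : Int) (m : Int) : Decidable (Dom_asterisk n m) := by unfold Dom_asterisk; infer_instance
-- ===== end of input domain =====

-- B replaces A's include/exclude recursion for combinations by a first-chosen-index
-- comprehension and replaces A's per-position membership scan during masking by direct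
-- index assignment into a char list (objective: alternative decomposition, same cost).

-- ===== PORT A =====
-- recursive helper 'combination'; when lst = [] and r ≠ 0 Python evaluates list[0] and
-- raises IndexError (reachable from 'asterisk' only for m < 0, excluded by Pre_) — that
-- branch returns [] here.
def combinationA (lst : List Int) (r : Int) : List (List Int) :=
  if (lst.length : Int) = r ∧ r > 0 then [lst]
  else if r = 0 then [[]]
  else
    match lst with
    | [] => []
    | first :: remLst =>
      (combinationA remLst r).foldl (fun result p => result ++ [p])
        ((combinationA remLst (r - 1)).foldl (fun result p => result ++ [first :: p]) [])

def asterisk (n : Int) (m : Int) : List String :=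
  let q : List Char := (PySem.Int.toStr n).toList
  let st := q.foldl
    (fun (st : PySem.Dict Char (List Int) × Int) num =>
      (if st.1.contains num then st.1.modify num [] (fun l => l ++ [st.2])
       else st.1.insert num [st.2], st.2 + 1))
    (PySem.Dict.empty, 0)
  let a := st.1
  -- 'for digit in a' iterates the dict's keys; a[digit] cannot fail there, ported get?.getD []
  a.keys.foldl (fun ast digit =>
    if ((((a.get? digit).getD []).length : Int) ≥ m) then
      (combinationA ((a.get? digit).getD []) m).foldl (fun ast com =>
        ast ++ [String.ofList ((PySem.List.pyRange 0 (q.length : Int) 1).foldl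
          (fun k i => k ++ [if i ∈ com then '*' else PySem.List.pyGetD q i ' ']) [])]) ast
    else ast) []

-- ===== PORT B =====
-- fuel makes the recursion total; Python's recursion diverges only for r < 0 (outside
-- Pre_), and for 0 ≤ r the call site's fuel lst.length + 1 is never exhausted.
def combosB (fuel : Nat) (lst : List Int) (r : Int) : List (List Int) :=
  match fuel with
  | 0 => []
  | fuel + 1 =>
    if r = 0 then [[]]
    else
      (List.range ((lst.length : Int) - r + 1).toNat).flatMap (fun (i : Nat) =>
        (combosB fuel (PySem.List.slice lst (some ((i : Int) + 1)) none) (r - 1)).map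
          (fun rest => PySem.List.pyGetD lst (i : Int) 0 :: rest))

def asterisk_alt (n : Int) (m : Int) : List String :=
  let q : List Char := (PySem.Int.toStr n).toList
  -- groups.setdefault(ch, []).append(i)  ==  groups[ch] = groups.get(ch, []) + [i]
  let groups := (PySem.List.enumerate q).foldl
    (fun g (p : Int × Char) => g.modify p.2 [] (fun l => l ++ [p.1]))
    (PySem.Dict.empty : PySem.Dict Char (List Int))
  groups.values.foldl (fun ast pos =>
    if ((pos.length : Int) ≥ m) then
      (combosB (pos.length + 1) pos m).foldl (fun ast com =>
        ast ++ [String.ofList (com.foldl (fun chars i => PySem.List.pySetD chars i '*') q)]) ast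
    else ast) []

-- ===== PRECONDITION & SPEC =====
-- For m < 0 Python A raises IndexError (and B's recursion does not terminate): excluded.
def Pre_asterisk (n : Int) (m : Int) : Prop := 0 ≤ m
instance (n : Int) (m : Int) : Decidable (Pre_asterisk n m) := by unfold Pre_asterisk; infer_instance
def pvWitness_asterisk : Int × Int := (1223, 2)

def Spec_asterisk (n : Int) (m : Int) (out : List String) : Prop := out = asterisk_alt n m
instance (n : Int) (m : Int) (out : List String) : Decidable (Spec_asterisk n m out) := by unfold Spec_asterisk; infer_instance

-- ===== CLAIM (what is proved, stated in full; the proofs are below) =====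
def Claim_equal_asterisk : Prop := ∀ (n : Int) (m : Int), Dom_asterisk n m → Pre_asterisk n m → Spec_asterisk n m (asterisk n m)

-- ===== LEMMAS AND PROOFS =====

theorem pv_flatMap_map {α β γ : Type} (l : List α) (g : α → β) (f : β → List γ) :
    (l.map g).flatMap f = l.flatMap (fun x => f (g x)) := by
  induction l with
  | nil => rfl
  | cons a t ih => simp only [List.map_cons, List.flatMap_cons, ih]

theorem pv_pyRange_zero (n : Nat) :
    PySem.List.pyRange 0 (n : Int) 1 = (List.range n).map (fun (k : Nat) => (k : Int)) := by
  rcases Nat.eq_zero_or_pos n with h | h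
  · subst h; simp [PySem.List.pyRange]
  · have hn : (0 : Int) < n := by exact_mod_cast h
    simp only [PySem.List.pyRange, if_neg (one_ne_zero), if_pos (by norm_num : (0:Int) < 1),
      if_pos hn]
    have h2 : (((n : Int) - 0 + 1 - 1) / 1).toNat = n := by
      simp only [Int.sub_zero, Int.add_sub_cancel, Int.ediv_one, Int.toNat_natCast]
    rw [h2]
    refine congrArg (fun f => List.map f (List.range n)) (funext fun k => ?_)
    simp

theorem combinationA_cons (first : Int) (remLst : List Int) (r : Int)
    (h1 : ¬ ((((first :: remLst).length : Nat) : Int) = r ∧ r > 0)) (h2 : r ≠ 0) :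
    combinationA (first :: remLst) r
      = (combinationA remLst (r - 1)).map (fun p => first :: p) ++ combinationA remLst r := by
  rw [combinationA, if_neg h1, if_neg h2]
  rw [PySem.List.foldl_append_singleton_eq_self, PySem.List.foldl_append_singleton_eq_map]
  simp

theorem combinationA_full (t : List Int) : combinationA t ((t.length : Nat) : Int) = [t] := by
  cases t with
  | nil => simp [combinationA]
  | cons a s =>
    rw [combinationA, if_pos ⟨rfl, by exact_mod_cast Nat.succ_pos s.length⟩]

-- the two combination generators agree for 0 ≤ r ≤ |lst| and sufficient fuel
theorem combos_eq (lst : List Int) : ∀ (fuel : Nat) (r : Int), 0 ≤ r → r ≤ (lst.length : Int) →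
    (lst.length : Nat) < fuel → combosB fuel lst r = combinationA lst r := by
  induction lst with
  | nil =>
    intro fuel r h0 h1 hf
    have hr : r = 0 := by simp at h1; omega
    subst hr
    match fuel, hf with
    | fuel + 1, _ => simp [combosB, combinationA]
  | cons a t ih =>
    intro fuel r h0 h1 hf
    simp only [List.length_cons] at h1 hf
    match fuel, hf with
    | fuel + 1, hf =>
      by_cases hr0 : r = 0
      · subst hr0; simp [combosB, combinationA]
      · have hrpos : 0 < r := lt_of_le_of_ne h0 (Ne.symm hr0)
        have hK : (((a :: t).length : Int) - r + 1).toNat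
            = ((t.length : Int) - r + 1).toNat + 1 := by
          simp only [List.length_cons]; omega
        have step : combosB (fuel + 1) (a :: t) r
            = (combosB fuel t (r - 1)).map (fun rest => a :: rest)
              ++ combosB (fuel + 1) t r := by
          rw [combosB, if_neg hr0, hK, List.range_succ_eq_map, List.flatMap_cons,
            pv_flatMap_map]
          congr 1
          · rw [PySem.List.slice_from _ (by norm_num)]
            norm_num [PySem.List.pyGetD_natCast]
          · rw [combosB, if_neg hr0]
            refine congrArg (fun f => List.flatMap f (List.range _)) (funext fun i => ?_)
            have hs1 : PySem.List.slice (a :: t) (some (((Nat.succ i : Nat) : Int) + 1)) none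
                = PySem.List.slice t (some ((i : Int) + 1)) none := by
              rw [PySem.List.slice_from _ (by omega),
                  PySem.List.slice_from _ (by omega)]
              have : (((Nat.succ i : Nat) : Int) + 1).toNat = ((i : Int) + 1).toNat + 1 := by
                push_cast; omega
              rw [this, List.drop_succ_cons]
            have hs2 : PySem.List.pyGetD (a :: t) ((Nat.succ i : Nat) : Int) 0
                = PySem.List.pyGetD t ((i : Nat) : Int) 0 := by
              rw [PySem.List.pyGetD_natCast, PySem.List.pyGetD_natCast, List.getD,
                List.getD, List.getElem?_cons_succ]
            rw [hs1, hs2]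
        rw [step, ih fuel (r - 1) (by omega) (by omega) (by omega)]
        by_cases hfull : r = ((t.length : Nat) : Int) + 1
        · have htail : combosB (fuel + 1) t r = [] := by
            rw [combosB, if_neg hr0]
            have hz : ((t.length : Int) - r + 1).toNat = 0 := by omega
            rw [hz]; simp
          have hlen : r - 1 = ((t.length : Nat) : Int) := by omega
          rw [htail, hlen, combinationA_full]
          rw [combinationA, if_pos ⟨by omega, hrpos⟩]
          simp
        · have hle : r ≤ (t.length : Int) := by omega
          rw [ih (fuel + 1) r h0 hle (by omega)]
          rw [combinationA_cons a t r (by omega) hr0]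

-- every element of a combination is an element of the list
theorem combinationA_mem (lst : List Int) : ∀ (r : Int) (c : List Int),
    c ∈ combinationA lst r → ∀ x ∈ c, x ∈ lst := by
  induction lst with
  | nil =>
    intro r c hc x hx
    rw [combinationA] at hc
    split_ifs at hc with h1 h2
    · simp only [List.mem_singleton] at hc; subst hc; simp at hx
    · simp only [List.mem_singleton] at hc; subst hc; simp at hx
    · simp at hc
  | cons a t ih =>
    intro r c hc x hx
    rw [combinationA] at hc
    split_ifs at hc with h1 h2
    · simp only [List.mem_singleton] at hc; subst hc; exact hx
    · simp only [List.mem_singleton] at hc; subst hc; simp at hx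
    · rw [PySem.List.foldl_append_singleton_eq_self,
        PySem.List.foldl_append_singleton_eq_map, List.nil_append] at hc
      rcases List.mem_append.1 hc with hmap | htail
      · rcases List.mem_map.1 hmap with ⟨p, hp, rfl⟩
        rcases List.mem_cons.1 hx with rfl | hx'
        · exact List.mem_cons_self
        · exact List.mem_cons_of_mem _ (ih (r - 1) p hp x hx')
      · exact List.mem_cons_of_mem _ (ih r c htail x hx)

-- result of the assignment loop, characterised as a map over all indices
theorem pv_setfold (com : List Int) : ∀ (cs : List Char),
    (∀ x ∈ com, 0 ≤ x ∧ x < (cs.length : Int)) →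
    com.foldl (fun chars i => PySem.List.pySetD chars i '*') cs
      = (List.range cs.length).map
          (fun (j : Nat) => if (j : Int) ∈ com then '*' else cs.getD j ' ') := by
  induction com with
  | nil =>
    intro cs _
    apply List.ext_getElem (by simp)
    intro i h1 h2
    simp only [List.foldl_nil] at h1 ⊢
    rw [List.getElem_map, List.getElem_range]
    rw [if_neg (by simp)]
    rw [List.getD_eq_getElem?_getD, List.getElem?_eq_getElem h1, Option.getD_some]
  | cons i com ih =>
    intro cs hb
    have hi := hb i List.mem_cons_self
    simp only [List.foldl_cons]
    rw [PySem.List.pySetD_of_nonneg _ _ hi.1,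
      ih _ (by intro x hx; have := hb x (List.mem_cons_of_mem _ hx); simpa using this)]
    apply List.ext_getElem (by simp)
    intro j hj1 hj2
    have hjlt : j < cs.length := by simpa using hj2
    rw [List.getElem_map, List.getElem_range, List.getElem_map, List.getElem_range]
    by_cases hjc : (j : Int) ∈ com
    · rw [if_pos hjc, if_pos (List.mem_cons_of_mem _ hjc)]
    · by_cases hji : (j : Int) = i
      · rw [if_neg hjc, if_pos (List.mem_cons.2 (Or.inl hji))]
        rw [List.getD_eq_getElem?_getD, List.getElem?_eq_getElem (by simpa using hjlt),
          Option.getD_some, List.getElem_set, if_pos (by omega)]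
      · rw [if_neg hjc, if_neg (by simp only [List.mem_cons]; tauto)]
        rw [List.getD_eq_getElem?_getD, List.getElem?_eq_getElem (by simpa using hjlt),
          Option.getD_some, List.getD_eq_getElem?_getD, List.getElem?_eq_getElem hjlt,
          Option.getD_some, List.getElem_set, if_neg (by omega)]

-- masking by membership scan equals masking by index assignment
theorem mask_eq (q : List Char) (com : List Int)
    (hb : ∀ x ∈ com, 0 ≤ x ∧ x < (q.length : Int)) :
    (PySem.List.pyRange 0 (q.length : Int) 1).foldl
        (fun k i => k ++ [if i ∈ com then '*' else PySem.List.pyGetD q i ' ']) []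
      = com.foldl (fun chars i => PySem.List.pySetD chars i '*') q := by
  rw [PySem.List.foldl_append_singleton_eq_map, pv_pyRange_zero, List.map_map,
    pv_setfold com q hb, List.nil_append]
  refine congrArg (fun f => List.map f (List.range q.length)) (funext fun j => ?_)
  simp [Function.comp, PySem.List.pyGetD_natCast]

-- A's counter-carrying grouping loop equals B's enumerate grouping loop
theorem group_eq (q : List Char) : ∀ (d : PySem.Dict Char (List Int)) (c : Int),
    (q.foldl (fun (st : PySem.Dict Char (List Int) × Int) num =>
      (if st.1.contains num then st.1.modify num [] (fun l => l ++ [st.2])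
       else st.1.insert num [st.2], st.2 + 1)) (d, c)).1
    = (PySem.List.enumerate q c).foldl
        (fun g (p : Int × Char) => g.modify p.2 [] (fun l => l ++ [p.1])) d := by
  induction q with
  | nil => intro d c; simp [PySem.List.enumerate]
  | cons x xs ih =>
    intro d c
    rw [PySem.List.enumerate_cons]
    simp only [List.foldl_cons]
    rw [← ih]
    have hstep : (if d.contains x then d.modify x [] (fun l => l ++ [c])
        else d.insert x [c]) = d.modify x [] (fun l => l ++ [c]) := by
      by_cases h : d.contains x
      · simp [h]
      · have h' : d.contains x = false := by simpa using h
        simp [h', PySem.Dict.modify, PySem.Dict.getD_of_not_contains]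
    rw [hstep]

-- positions stored for any key are indices into q
theorem group_bounds (q : List Char) (k : Char) :
    ∀ x ∈ ((PySem.List.enumerate q 0).foldl
        (fun g (p : Int × Char) => g.modify p.2 [] (fun l => l ++ [p.1]))
        (PySem.Dict.empty : PySem.Dict Char (List Int))).getD k [],
      0 ≤ x ∧ x < (q.length : Int) := by
  intro x hx
  have hrw : (PySem.List.enumerate q 0).foldl
      (fun g (p : Int × Char) => g.modify p.2 [] (fun l => l ++ [p.1]))
      (PySem.Dict.empty : PySem.Dict Char (List Int))
    = ((PySem.List.enumerate q 0).map (fun p => (p.2, p.1))).foldl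
      (fun d p => d.modify p.1 [] (fun l => l ++ [p.2])) PySem.Dict.empty := by
    rw [List.foldl_map]
  rw [hrw, PySem.Dict.getD_foldl_modify_append, PySem.Dict.getD_empty, List.nil_append] at hx
  rcases List.mem_map.1 hx with ⟨pr, hprf, rfl⟩
  have hpr : pr ∈ (PySem.List.enumerate q 0).map (fun p => (p.2, p.1)) :=
    (List.mem_filter.1 hprf).1
  rcases List.mem_map.1 hpr with ⟨p, hp, rfl⟩
  rcases (PySem.List.mem_enumerate_iff q 0 p).1 hp with ⟨j, hj, rfl⟩
  refine ⟨by simp, ?_⟩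
  simp only [zero_add]
  exact_mod_cast hj

-- ===== VERDICT (by name: the statement is the Claim_ definition above) =====
theorem asterisk_spec : Claim_equal_asterisk := by
  intro n m _ hm
  unfold Spec_asterisk
  simp only [asterisk, asterisk_alt]
  rw [group_eq]
  set q : List Char := (PySem.Int.toStr n).toList with hq
  set G := (PySem.List.enumerate q 0).foldl
    (fun g (p : Int × Char) => g.modify p.2 [] (fun l => l ++ [p.1]))
    (PySem.Dict.empty : PySem.Dict Char (List Int)) with hG
  have hnd : G.keys.Nodup := by
    rw [hG]
    exact PySem.Dict.nodup_keys_foldl_modify_key (PySem.List.enumerate q 0)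
      (fun (p : Int × Char) => p.2) [] (fun _ (p : Int × Char) => fun l => l ++ [p.1])
      PySem.Dict.empty PySem.Dict.nodup_keys_empty
  rw [PySem.Dict.values_eq_map_keys G hnd [], List.foldl_map]
  simp only [← PySem.Dict.getD_eq_get?_getD]
  refine PySem.List.foldl_congr_mem _ _ _ _ ?_
  intro ast k _
  by_cases hcond : ((G.getD k []).length : Int) ≥ m
  · rw [if_pos hcond, if_pos hcond]
    rw [combos_eq (G.getD k []) ((G.getD k []).length + 1) m hm (by omega) (by omega)]
    refine PySem.List.foldl_congr_mem _ _ _ _ ?_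
    intro ast' com hcom
    have hb : ∀ x ∈ com, 0 ≤ x ∧ x < (q.length : Int) := by
      intro x hx
      exact group_bounds q k x (combinationA_mem (G.getD k []) m com hcom x hx)
    rw [mask_eq q com hb]
  · rw [if_neg hcond, if_neg hcond]
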